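-- pv_equiv track=rewrite | github.com/FabioTarocco/MULTILAYER-QIDA | plot_en_vqe.py | size_plot
-- ===== SOURCE A (Python) =====
-- def size_plot (idx, s_min, s_all, l):
--     s = []
--     for i in range(l):
--         if i in idx:
--             s.append(s_min)
--         else:
--
--             s.append(s_all)
--     return s
-- ===== SOURCE B (Python) =====
-- def size_plot(idx, s_min, s_all, l):
--     # fill-then-scatter: uniform list, then overwrite the positions named in idx
--     s = [s_all] * l
--     for j in idx:
--         if 0 <= j < l:
--             s[j] = s_min
--     return s
-- ===== Notes on version B (the rewrite author's own statement) =====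
-- stated objective: faster
-- what changed: Replaces the per-position loop with an 'i in idx' membership scan by a fill-then-scatter pass: build [s_all]*l once, then overwrite s[j]=s_min for each in-range j in idx.
import Mathlib
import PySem

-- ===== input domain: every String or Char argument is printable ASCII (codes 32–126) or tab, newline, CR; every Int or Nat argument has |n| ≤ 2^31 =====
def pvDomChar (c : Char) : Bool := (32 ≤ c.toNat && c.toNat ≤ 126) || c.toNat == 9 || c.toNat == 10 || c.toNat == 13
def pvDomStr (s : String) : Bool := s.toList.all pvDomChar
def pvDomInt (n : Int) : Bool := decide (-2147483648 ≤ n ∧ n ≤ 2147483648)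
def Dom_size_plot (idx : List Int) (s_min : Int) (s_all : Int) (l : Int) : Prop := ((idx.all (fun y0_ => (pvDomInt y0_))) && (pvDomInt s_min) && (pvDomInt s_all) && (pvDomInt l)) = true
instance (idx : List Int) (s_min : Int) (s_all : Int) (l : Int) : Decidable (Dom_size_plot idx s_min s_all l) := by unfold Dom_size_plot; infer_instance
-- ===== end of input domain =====

-- B replaces A's per-position membership scan with a fill-then-scatter pass (uniform list, then overwrite at idx).

-- ===== PORT A =====
-- s = []; for i in range(l): s.append(s_min if i in idx else s_all); return s
def size_plot (idx : List Int) (s_min : Int) (s_all : Int) (l : Int) : List Int :=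
  (PySem.List.pyRange 0 l 1).foldl
    (fun s i => s ++ [if idx.contains i then s_min else s_all]) []

-- ===== PORT B =====
-- s = [s_all] * l; for j in idx: if 0 <= j < l: s[j] = s_min; return s
def size_plot_alt (idx : List Int) (s_min : Int) (s_all : Int) (l : Int) : List Int :=
  idx.foldl
    (fun s j => if 0 ≤ j ∧ j < l then s.set j.toNat s_min else s)
    (List.replicate l.toNat s_all)

-- ===== PRECONDITION & SPEC =====
def Spec_size_plot (idx : List Int) (s_min : Int) (s_all : Int) (l : Int) (out : List Int) : Prop := out = size_plot_alt idx s_min s_all l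
instance (idx : List Int) (s_min : Int) (s_all : Int) (l : Int) (out : List Int) : Decidable (Spec_size_plot idx s_min s_all l out) := by unfold Spec_size_plot; infer_instance

-- ===== CLAIM (what is proved, stated in full; the proofs are below) =====
def Claim_equal_size_plot : Prop := ∀ (idx : List Int) (s_min : Int) (s_all : Int) (l : Int), Dom_size_plot idx s_min s_all l → Spec_size_plot idx s_min s_all l (size_plot idx s_min s_all l)

-- ===== LEMMAS AND PROOFS =====

/-- A's append-fold is a map over the iterated list. -/
theorem foldl_append_singleton {α β : Type} (f : α → β) :
    ∀ (xs : List α) (acc : List β),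
      xs.foldl (fun s i => s ++ [f i]) acc = acc ++ xs.map f := by
  intro xs
  induction xs with
  | nil => simp
  | cons x xs ih => intro acc; simp [List.foldl_cons, ih]

/-- B's scatter fold preserves the length. -/
theorem scatter_length (s_min l : Int) :
    ∀ (idx : List Int) (s : List Int),
      (idx.foldl (fun s j => if 0 ≤ j ∧ j < l then s.set j.toNat s_min else s) s).length
        = s.length := by
  intro idx
  induction idx with
  | nil => simp
  | cons j rest ih =>
      intro s
      simp only [List.foldl_cons]
      rw [ih]
      split_ifs <;> simp

/-- Pointwise value of B's scatter fold. -/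
theorem scatter_get (s_min l : Int) :
    ∀ (idx : List Int) (s : List Int) (i : Nat) (hi : i < s.length),
      (idx.foldl (fun s j => if 0 ≤ j ∧ j < l then s.set j.toNat s_min else s) s)[i]'
          (by rw [scatter_length]; exact hi)
        = if ((i : Int) ∈ idx ∧ (i : Int) < l) then s_min else s[i] := by
  intro idx
  induction idx with
  | nil => intro s i hi; simp
  | cons j rest ih =>
      intro s i hi
      simp only [List.foldl_cons]
      have hlen : (if 0 ≤ j ∧ j < l then s.set j.toNat s_min else s).length = s.length := by
        split_ifs <;> simp
      rw [ih _ i (by rw [hlen]; exact hi)]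
      by_cases hrest : (i : Int) ∈ rest ∧ (i : Int) < l
      · simp [hrest, List.mem_cons]
      · simp only [hrest, if_false]
        by_cases hij : j = (i : Int)
        · subst hij
          by_cases hjl : (i : Int) < l
          · have h0 : (0 : Int) ≤ (i : Int) := Int.natCast_nonneg i
            simp [h0, hjl, List.mem_cons]
          · have hng : ¬ ((0 : Int) ≤ (i : Int) ∧ (i : Int) < l) := by tauto
            simp only [hng, if_false]
            have hc : ¬ ((i : Int) ∈ ((i : Int) :: rest) ∧ (i : Int) < l) :=
              fun h => hjl h.2
            rw [if_neg hc]
        · by_cases hj : 0 ≤ j ∧ j < l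
          · have hne : j.toNat ≠ i := by omega
            have hcond : ¬ (((i : Int) = j ∨ (i : Int) ∈ rest) ∧ (i : Int) < l) := by
              rcases hj with ⟨_, _⟩
              intro ⟨h1, h2⟩
              rcases h1 with h1 | h1
              · exact hij h1.symm
              · exact hrest ⟨h1, h2⟩
            simp [hj, List.getElem_set, hne, List.mem_cons, hcond]
          · have hcond : ¬ (((i : Int) = j ∨ (i : Int) ∈ rest) ∧ (i : Int) < l) := by
              intro ⟨h1, h2⟩
              rcases h1 with h1 | h1
              · exact hij h1.symm
              · exact hrest ⟨h1, h2⟩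
            simp [hj, List.mem_cons, hcond]

-- ===== VERDICT (by name: the statement is the Claim_ definition above) =====
theorem size_plot_spec : Claim_equal_size_plot := by
  intro idx s_min s_all l _
  unfold Spec_size_plot size_plot size_plot_alt
  rw [foldl_append_singleton, List.nil_append, PySem.List.pyRange_one]
  apply List.ext_getElem
  · rw [scatter_length]; simp
  · intro i h1 h2
    have hi : i < l.toNat := by simpa using h1
    have hil : (i : Int) < l := by omega
    rw [scatter_get s_min l idx _ i (by simpa using hi)]
    have hrep : (List.replicate l.toNat s_all)[i]'(by simpa using hi) = s_all := by
      simp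
    rw [hrep]
    simp only [List.getElem_map, List.getElem_range, Int.sub_zero, zero_add]
    by_cases hm : (i : Int) ∈ idx
    · simp [hm, hil, List.contains_iff_mem]
    · simp [hm, List.contains_iff_mem]
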